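-- pv_equiv track=rewrite | github.com/HONOOUR/Algorithm_Test | Algorithm_Python/old/test.py | solution
-- ===== SOURCE A (Python) =====
-- def solution(N, A, B):
--     graph = [[] for _ in range(N+1)]
--     for i in range(len(A)):
--         graph[A[i]].append(B[i])
--         graph[B[i]].append(A[i])
--
--     for i in range(1, N):
--         if i+1 not in graph[i]:
--             return False
--     return True
-- ===== SOURCE B (Python) =====
-- # Counting instead of scanning: each needed position 1..N-1 is covered by a consecutive edge;
-- # since the covered set is a subset of {1..N-1}, checking its size replaces the per-position loop.
-- def solution(N, A, B):
--     covered = {min(a, b) for a, b in zip(A, B) if abs(a - b) == 1 and 0 < min(a, b) < N}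
--     return len(covered) >= N - 1
-- ===== Notes on version B (the rewrite author's own statement) =====
-- stated objective: alternative
-- what changed: Replaces A's adjacency lists plus per-position membership scan by a counting argument: one pass collects the distinct positions min(a,b) of consecutive edges inside (0,N) into a set, and the answer is a single size comparison len(covered) >= N-1 (no loop over positions), correct because the covered set is a subset of {1..N-1}.
-- outside the precondition, e.g. on solution(3, [1, -2], [2, 3]): A returns True, B returns False; on solution(2, [-2], [2]): A returns True, B returns False
import Mathlib
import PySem

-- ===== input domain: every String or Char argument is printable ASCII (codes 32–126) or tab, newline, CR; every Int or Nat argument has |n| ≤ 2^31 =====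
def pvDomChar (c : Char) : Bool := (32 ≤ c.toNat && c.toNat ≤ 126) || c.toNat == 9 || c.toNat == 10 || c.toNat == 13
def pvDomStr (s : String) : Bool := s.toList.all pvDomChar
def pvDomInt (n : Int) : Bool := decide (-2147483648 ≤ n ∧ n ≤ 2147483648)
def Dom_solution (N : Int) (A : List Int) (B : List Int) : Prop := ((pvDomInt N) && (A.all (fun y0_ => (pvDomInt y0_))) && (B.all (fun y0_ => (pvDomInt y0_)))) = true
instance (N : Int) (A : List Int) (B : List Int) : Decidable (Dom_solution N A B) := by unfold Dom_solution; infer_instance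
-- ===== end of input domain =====

-- B replaces A's adjacency lists and its per-position membership scan by a size comparison on the
-- set of covered positions; return values agree on all of Pre_solution (A mutates nothing observable).

-- ===== PORT A =====
-- graph[idx].append(v) on a Python list of lists: read (possibly negative idx), append, write back.
def pyAppendAt? (g : List (List Int)) (idx : Int) (v : Int) : Option (List (List Int)) :=
  match PySem.List.pyGet? g idx with
  | none => none
  | some row => PySem.List.pySet? g idx (row ++ [v])

-- body of 'for i in range(len(A)): graph[A[i]].append(B[i]); graph[B[i]].append(A[i])'
def buildStep (A : List Int) (B : List Int) (og : Option (List (List Int))) (i : Int) :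
    Option (List (List Int)) :=
  og.bind fun g =>
    (PySem.List.pyGet? A i).bind fun a =>
      (PySem.List.pyGet? B i).bind fun b =>
        (pyAppendAt? g a b).bind fun g' => pyAppendAt? g' b a

def solution (N : Int) (A : List Int) (B : List Int) : Bool :=
  let graph0 : List (List Int) := List.replicate (N + 1).toNat []
  match (PySem.List.pyRange 0 (A.length : Int) 1).foldl (buildStep A B) (some graph0) with
  | none => false   -- Python raises here; such inputs are outside Pre_solution
  | some g => (PySem.List.pyRange 1 N 1).all fun i =>
      (PySem.List.pyGetD g i []).contains (i + 1)

-- ===== PORT B =====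
def solution_alt (N : Int) (A : List Int) (B : List Int) : Bool :=
  let covered : PySem.Set Int :=
    PySem.Set.ofList (((A.zip B).filter fun p =>
      (p.1 - p.2).natAbs == 1 && decide (0 < min p.1 p.2) && decide (min p.1 p.2 < N)).map
      fun p => min p.1 p.2)
  decide (N - 1 ≤ (covered.length : Int))

-- ===== PRECONDITION & SPEC =====
-- Pre_ admits every input on which A returns normally (len(A) ≤ len(B), every used label an
-- in-range index of graph, i.e. -(N+1) ≤ x ≤ N; anything else raises IndexError) EXCEPT the
-- edge pairs with a negative endpoint whose Python negative-index wraparound lands exactly one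
-- below the other endpoint (p.1 < 0 ∧ p.2 = N+2+p.1, or symmetrically): there A accidentally
-- counts the wrapped edge as consecutive — an artefact of list-index wraparound outside the
-- task's node domain that B does not mimic.  All other negative-label inputs stay inside Pre_
-- and are proved equal.
def Pre_solution (N : Int) (A : List Int) (B : List Int) : Prop :=
  A.length ≤ B.length ∧
  (∀ x ∈ A, -1 - N ≤ x ∧ x ≤ N) ∧ (∀ x ∈ B.take A.length, -1 - N ≤ x ∧ x ≤ N) ∧
  (∀ p ∈ A.zip B, ¬(p.1 < 0 ∧ p.2 = N + 2 + p.1) ∧ ¬(p.2 < 0 ∧ p.1 = N + 2 + p.2))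
instance (N : Int) (A : List Int) (B : List Int) : Decidable (Pre_solution N A B) := by
  unfold Pre_solution; infer_instance

def pvWitness_solution : Int × List Int × List Int := (4, [1, 2, 3], [2, 3, 4])

def Spec_solution (N : Int) (A : List Int) (B : List Int) (out : Bool) : Prop := out = solution_alt N A B
instance (N : Int) (A : List Int) (B : List Int) (out : Bool) : Decidable (Spec_solution N A B out) := by unfold Spec_solution; infer_instance

-- ===== CLAIM (what is proved, stated in full; the proofs are below) =====
def Claim_equal_solution : Prop := ∀ (N : Int) (A : List Int) (B : List Int), Dom_solution N A B → Pre_solution N A B → Spec_solution N A B (solution N A B)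

-- ===== LEMMAS AND PROOFS =====

-- the edge-indexed build loop, rephrased on the zipped edge list
def edgeStep (og : Option (List (List Int))) (p : Int × Int) : Option (List (List Int)) :=
  og.bind fun g => (pyAppendAt? g p.1 p.2).bind fun g' => pyAppendAt? g' p.2 p.1

-- row of the adjacency table at a nonnegative position
def rowN (g : List (List Int)) (u : Nat) : List Int := g.getD u []

-- Python's effective index for a (possibly negative) in-range index
def effIdx (n : Nat) (i : Int) : Nat := if 0 ≤ i then i.toNat else n - (-i).toNat

theorem pyIdx?_inrange (n : Nat) (i : Int) (h1 : -(n : Int) ≤ i) (h2 : i < (n : Int)) :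
    PySem.List.pyIdx? n i = some (effIdx n i) := by
  unfold PySem.List.pyIdx? effIdx
  split_ifs <;> simp_all

theorem effIdx_lt (n : Nat) (i : Int) (h1 : -(n : Int) ≤ i) (h2 : i < (n : Int)) :
    effIdx n i < n := by
  unfold effIdx; split_ifs <;> omega

theorem append_mem (g : List (List Int)) (a v : Int)
    (h1 : -(g.length : Int) ≤ a) (h2 : a < (g.length : Int)) :
    ∃ g', pyAppendAt? g a v = some g' ∧ g'.length = g.length ∧
      ∀ (u : Nat) (w : Int), w ∈ rowN g' u ↔ w ∈ rowN g u ∨ (u = effIdx g.length a ∧ w = v) := by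
  set k := effIdx g.length a with hk
  have hkL : k < g.length := effIdx_lt _ _ h1 h2
  have hidx := pyIdx?_inrange g.length a h1 h2
  refine ⟨g.set k (g[k] ++ [v]), ?_, by simp, ?_⟩
  · rw [pyAppendAt?]
    simp only [PySem.List.pyGet?, PySem.List.pySet?, hidx, ← hk, Option.bind_some,
      Option.map_some, List.getElem?_eq_getElem hkL]
  · intro u w
    unfold rowN
    by_cases hu : u = k
    · subst hu
      simp [List.getD, hkL]
    · simp [List.getD, List.getElem?_set_ne (by omega : k ≠ u), hu]

theorem edgeStep_mem (g : List (List Int)) (a b : Int)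
    (ha1 : -(g.length : Int) ≤ a) (ha2 : a < (g.length : Int))
    (hb1 : -(g.length : Int) ≤ b) (hb2 : b < (g.length : Int)) :
    ∃ g', edgeStep (some g) (a, b) = some g' ∧ g'.length = g.length ∧
      ∀ (u : Nat) (w : Int), w ∈ rowN g' u ↔
        w ∈ rowN g u ∨ (u = effIdx g.length a ∧ w = b) ∨ (u = effIdx g.length b ∧ w = a) := by
  obtain ⟨g1, h1, hl1, hm1⟩ := append_mem g a b ha1 ha2
  obtain ⟨g2, h2, hl2, hm2⟩ := append_mem g1 b a (by omega) (by omega)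
  refine ⟨g2, ?_, by omega, ?_⟩
  · simp [edgeStep, h1, h2]
  · intro u w
    rw [hm2, hm1, hl1]
    tauto

theorem fold_mem (L : Nat) :
    ∀ (es : List (Int × Int)) (g : List (List Int)), g.length = L →
      (∀ p ∈ es, -(L : Int) ≤ p.1 ∧ p.1 < (L : Int) ∧ -(L : Int) ≤ p.2 ∧ p.2 < (L : Int)) →
      ∃ g', es.foldl edgeStep (some g) = some g' ∧ g'.length = L ∧
        ∀ (u : Nat) (w : Int), w ∈ rowN g' u ↔ w ∈ rowN g u ∨
          ∃ p ∈ es, (u = effIdx L p.1 ∧ w = p.2) ∨ (u = effIdx L p.2 ∧ w = p.1) := by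
  intro es
  induction es with
  | nil => intro g hg _; exact ⟨g, rfl, hg, by simp⟩
  | cons e es ih =>
    intro g hg hok
    obtain ⟨ha1, ha2, hb1, hb2⟩ := hok e (List.mem_cons_self)
    obtain ⟨g1, h1, hl1, hm1⟩ :=
      edgeStep_mem g e.1 e.2 (hg ▸ ha1) (hg ▸ ha2) (hg ▸ hb1) (hg ▸ hb2)
    obtain ⟨g', h', hl', hm'⟩ := ih g1 (hl1.trans hg) (fun p hp => hok p (List.mem_cons_of_mem _ hp))
    refine ⟨g', ?_, hl', ?_⟩
    · simpa [h1] using h'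
    · intro u w
      rw [hm', hm1, hg]
      constructor
      · rintro ((h | h) | ⟨p, hp, h⟩)
        · exact Or.inl h
        · exact Or.inr ⟨e, List.mem_cons_self, h⟩
        · exact Or.inr ⟨p, List.mem_cons_of_mem _ hp, h⟩
      · rintro (h | ⟨p, hp, h⟩)
        · exact Or.inl (Or.inl h)
        · rcases List.mem_cons.1 hp with rfl | hp
          · exact Or.inl (Or.inr h)
          · exact Or.inr ⟨p, hp, h⟩

theorem build_eq_zip_aux (A B : List Int) (h : A.length ≤ B.length)
    (g0 : Option (List (List Int))) :
    ∀ n : Nat, n ≤ A.length →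
      (PySem.List.pyRange 0 (n : Int) 1).foldl (buildStep A B) g0
        = ((A.zip B).take n).foldl edgeStep g0 := by
  intro n
  induction n with
  | zero => simp
  | succ n ih =>
    intro hn
    have hn' : n ≤ A.length := Nat.le_of_succ_le hn
    have hnA : n < A.length := hn
    have hnB : n < B.length := lt_of_lt_of_le hnA h
    have hz : n < (A.zip B).length := by simp [List.length_zip]; omega
    have : ((n + 1 : Nat) : Int) = (n : Int) + 1 := by push_cast; ring
    rw [this, PySem.List.pyRange_one_succ_right (by positivity), List.foldl_append,
      List.take_add_one, List.foldl_append, ih hn']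
    simp [List.getElem?_eq_getElem hz, buildStep, edgeStep,
      PySem.List.pyGet?_natCast, List.getElem?_eq_getElem hnA, List.getElem?_eq_getElem hnB,
      List.getElem_zip]

-- the counting step: a duplicate-free list of elements of (0,N) has length ≥ N-1 exactly
-- when it exhausts (0,N)
theorem card_iff (N : Int) (S : List Int) (hnd : S.Nodup) (hsub : ∀ m ∈ S, 0 < m ∧ m < N) :
    (N - 1 ≤ (S.length : Int)) ↔ ∀ i : Int, 0 < i → i < N → i ∈ S := by
  have hsub' : S.toFinset ⊆ Finset.Ioo 0 N := by
    intro m hm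
    rw [List.mem_toFinset] at hm
    simpa [Finset.mem_Ioo] using hsub m hm
  have hcard : S.toFinset.card = S.length := List.toFinset_card_of_nodup hnd
  have hIoo : (Finset.Ioo (0:Int) N).card = (N - 1).toNat := by
    simp [Int.card_Ioo]
  constructor
  · intro hlen i hi0 hiN
    have hle : (Finset.Ioo (0:Int) N).card ≤ S.toFinset.card := by
      rw [hcard, hIoo]; omega
    have := Finset.eq_of_subset_of_card_le hsub' hle
    have : i ∈ S.toFinset := by rw [this]; simp [Finset.mem_Ioo]; omega
    simpa [List.mem_toFinset] using this
  · intro hall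
    have hsup : Finset.Ioo (0:Int) N ⊆ S.toFinset := by
      intro i hi
      rw [Finset.mem_Ioo] at hi
      rw [List.mem_toFinset]
      exact hall i hi.1 hi.2
    have := Finset.card_le_card hsup
    rw [hcard, hIoo] at this
    omega

theorem zip_take_len {α β : Type} : ∀ (A : List α) (B : List β), A.zip (B.take A.length) = A.zip B := by
  intro A
  induction A with
  | nil => intro B; simp
  | cons a A ih =>
    intro B
    cases B with
    | nil => simp
    | cons b B => simp [ih]

theorem main_equiv (N : Int) (A B : List Int) (h : Pre_solution N A B) :
    solution N A B = solution_alt N A B := by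
  obtain ⟨hlen, hA, hB, hnw⟩ := h
  have hbound : ∀ p ∈ A.zip B, -(N+1) ≤ p.1 ∧ p.1 ≤ N ∧ -(N+1) ≤ p.2 ∧ p.2 ≤ N := by
    intro p hp
    rw [← zip_take_len] at hp
    obtain ⟨h1, h2⟩ := List.of_mem_zip hp
    obtain ⟨ha1, ha2⟩ := hA p.1 h1
    obtain ⟨hb1, hb2⟩ := hB p.2 h2
    exact ⟨by omega, ha2, by omega, hb2⟩
  set L := (N + 1).toNat with hL
  have hLcast : ∀ p ∈ A.zip B, -(L : Int) ≤ p.1 ∧ p.1 < (L : Int) ∧ -(L : Int) ≤ p.2 ∧ p.2 < (L : Int) := by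
    intro p hp
    obtain ⟨h1, h2, h3, h4⟩ := hbound p hp
    refine ⟨by omega, by omega, by omega, by omega⟩
  obtain ⟨g', hg', hlg', hm⟩ :=
    fold_mem L (A.zip B) (List.replicate L []) (by simp) hLcast
  have hrow0 : ∀ (u : Nat) (w : Int), w ∈ rowN (List.replicate L ([] : List Int)) u ↔ False := by
    intro u w
    simp [rowN, List.getD, List.getElem?_replicate]
    split_ifs <;> simp
  show (match (PySem.List.pyRange 0 (A.length : Int) 1).foldl (buildStep A B)
      (some (List.replicate (N + 1).toNat [])) with
    | none => false
    | some g => (PySem.List.pyRange 1 N 1).all fun i =>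
        (PySem.List.pyGetD g i []).contains (i + 1)) =
    decide (N - 1 ≤ ((PySem.Set.ofList (((A.zip B).filter fun p =>
      (p.1 - p.2).natAbs == 1 && decide (0 < min p.1 p.2) && decide (min p.1 p.2 < N)).map
      fun p => min p.1 p.2)).length : Int))
  rw [build_eq_zip_aux A B hlen _ A.length le_rfl,
    List.take_of_length_le (by simp [List.length_zip]), hg']
  simp only []
  rw [Bool.eq_iff_iff, List.all_eq_true, decide_eq_true_eq]
  rw [card_iff N _ (PySem.Set.nodup_ofList _)
    (by
      intro m hm
      rw [PySem.Set.mem_ofList] at hm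
      obtain ⟨p, hp, hpm⟩ := List.mem_map.1 hm
      obtain ⟨_, hc⟩ := List.mem_filter.1 hp
      simp only [Bool.and_eq_true, decide_eq_true_eq, beq_iff_eq] at hc
      omega)]
  constructor
  · intro hall i hi0 hiN
    have hi := hall i (by rw [PySem.List.mem_pyRange_one]; omega)
    rw [List.contains_iff_mem, PySem.List.pyGetD_of_nonneg _ _ (by omega)] at hi
    have hi' : i + 1 ∈ rowN g' i.toNat := hi
    rcases (hm _ _).1 hi' with h0 | ⟨p, hp, hc⟩
    · exact ((hrow0 _ _).1 h0).elim
    · obtain ⟨hb1, hb2, hb3, hb4⟩ := hbound p hp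
      obtain ⟨hw1, hw2⟩ := hnw p hp
      rw [PySem.Set.mem_ofList]
      simp only [effIdx] at hc
      refine List.mem_map.2 ⟨p, List.mem_filter.2 ⟨hp, ?_⟩, ?_⟩
      · simp only [Bool.and_eq_true, decide_eq_true_eq, beq_iff_eq]
        rcases hc with ⟨h1, h2⟩ | ⟨h1, h2⟩ <;> split_ifs at h1 <;> omega
      · rcases hc with ⟨h1, h2⟩ | ⟨h1, h2⟩ <;> split_ifs at h1 <;> omega
  · intro hcov x hx
    rw [PySem.List.mem_pyRange_one] at hx
    have hx' := hcov x (by omega) (by omega)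
    rw [PySem.Set.mem_ofList] at hx'
    obtain ⟨p, hp', hpm⟩ := List.mem_map.1 hx'
    obtain ⟨hp, hc⟩ := List.mem_filter.1 hp'
    simp only [Bool.and_eq_true, decide_eq_true_eq, beq_iff_eq] at hc
    obtain ⟨hb1, hb2, hb3, hb4⟩ := hbound p hp
    rw [List.contains_iff_mem, PySem.List.pyGetD_of_nonneg _ _ (by omega)]
    refine (hm _ _).2 (Or.inr ⟨p, hp, ?_⟩)
    simp only [effIdx]
    split_ifs <;> omega

-- ===== VERDICT (by name: the statement is the Claim_ definition above) =====
theorem solution_spec : Claim_equal_solution := by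
  intro N A B _ hpre
  unfold Spec_solution
  exact main_equiv N A B hpre
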